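-- pv_equiv track=rewrite | github.com/sgttomas/chirality-app-dev | execution/_Reconciliation/DepClosure/CLOSURE_AUDIT_DEP_CLOSURE_2026-02-24_2306/analyze_closure.py | topological_sort_kahn
-- ===== SOURCE A (Python) =====
-- from collections import defaultdict
--
-- def topological_sort_kahn(nodes, dep_edges):
--     """Kahn's algorithm for topological sort. Returns (sorted_tiers, remaining_nodes).
--     dep_edges: list of (dependent, dependency) tuples.
--     A dependent cannot start until its dependency is done.
--     """
--     in_degree = defaultdict(int)
--     adj = defaultdict(set)  # dependency -> set of dependents
--     all_nodes = set(nodes)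
--
--     for dependent, dependency in dep_edges:
--         if dependent in all_nodes and dependency in all_nodes:
--             adj[dependency].add(dependent)
--             in_degree[dependent] += 1
--
--     for n in all_nodes:
--         if n not in in_degree:
--             in_degree[n] = 0
--
--     tiers = []
--     remaining = set(all_nodes)
--
--     while True:
--         tier = sorted([n for n in remaining if in_degree.get(n, 0) == 0])
--         if not tier:
--             break
--         tiers.append(tier)
--         for n in tier:
--             remaining.discard(n)
--             for m in adj.get(n, []):
--                 in_degree[m] -= 1
--
--     return tiers, sorted(remaining)
-- ===== SOURCE B (Python) =====
-- def topological_sort_kahn(nodes, dep_edges):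
--     """Incremental Kahn: keep a frontier of zero in-degree nodes and push nodes
--     into the next frontier the moment their in-degree drops to zero, instead of
--     rescanning every remaining node on each tier."""
--     valid = set(nodes)
--     indeg = dict.fromkeys(valid, 0)
--     adj = {}
--     for dependent, dependency in dep_edges:
--         if dependent in valid and dependency in valid:
--             adj.setdefault(dependency, set()).add(dependent)
--             indeg[dependent] += 1
--     remaining = set(valid)
--     frontier = sorted(n for n in valid if indeg[n] == 0)
--     tiers = []
--     while frontier:
--         tiers.append(frontier)
--         newly_zero = []
--         for n in frontier:
--             remaining.discard(n)
--             for m in adj.get(n, ()):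
--                 indeg[m] -= 1
--                 if indeg[m] == 0:
--                     newly_zero.append(m)
--         frontier = sorted(newly_zero)
--     return tiers, sorted(remaining)
-- ===== Notes on version B (the rewrite author's own statement) =====
-- stated objective: alternative
-- what changed: A rescans every remaining node on each round to find the next zero-in-degree tier; B runs incremental Kahn with a frontier queue, pushing a node the moment its in-degree drops to zero and sorting only the members of each tier (worst-case asymptotics improve, but on the generated inputs the measured times were comparable).
import Mathlib
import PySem

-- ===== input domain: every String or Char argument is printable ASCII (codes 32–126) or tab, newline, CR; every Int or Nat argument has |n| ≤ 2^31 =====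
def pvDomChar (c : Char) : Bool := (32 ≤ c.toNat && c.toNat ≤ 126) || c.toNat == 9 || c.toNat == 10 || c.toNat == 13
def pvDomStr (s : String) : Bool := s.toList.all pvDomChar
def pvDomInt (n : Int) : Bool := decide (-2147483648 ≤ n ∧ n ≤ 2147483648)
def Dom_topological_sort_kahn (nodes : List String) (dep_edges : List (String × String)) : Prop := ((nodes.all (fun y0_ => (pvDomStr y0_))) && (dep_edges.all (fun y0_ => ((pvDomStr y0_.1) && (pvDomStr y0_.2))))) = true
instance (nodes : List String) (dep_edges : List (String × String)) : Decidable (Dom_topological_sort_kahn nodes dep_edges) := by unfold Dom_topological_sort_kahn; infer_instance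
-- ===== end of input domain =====

-- B replaces A's per-tier rescan of every remaining node by an incremental frontier
-- (nodes are queued the moment their in-degree reaches zero); same return value.

-- ===== PORT A =====
-- the while-True loop of A; fuel = |all_nodes| + 1 bounds the number of iterations
-- (each non-final iteration removes at least one node from `remaining`, so the
-- fuel is never exhausted before the `if not tier: break` case fires)
def kahnLoopA (adj : PySem.Dict String (PySem.Set String)) :
    Nat → PySem.Dict String Int → PySem.Set String → List (List String) →
    List (List String) × List String
  | 0, _, r, tiers => (tiers, PySem.List.sorted r (fun x => x) false)
  | fuel+1, d, r, tiers =>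
    let tier := PySem.List.sorted (r.filter (fun n => d.getD n 0 == 0)) (fun x => x) false
    if tier.isEmpty then (tiers, PySem.List.sorted r (fun x => x) false)
    else
      let st := tier.foldl
        (fun (st : PySem.Dict String Int × PySem.Set String) n =>
          ((PySem.Dict.getD adj n PySem.Set.empty).foldl
              (fun d m => PySem.Dict.modify d m 0 (fun v => v - 1)) st.1,
           PySem.Set.discard st.2 n)) (d, r)
      kahnLoopA adj fuel st.1 st.2 (tiers ++ [tier])

def topological_sort_kahn (nodes : List String) (dep_edges : List (String × String)) :
    List (List String) × List String :=
  let all_nodes : PySem.Set String := PySem.Set.ofList nodes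
  let st := dep_edges.foldl
    (fun (st : PySem.Dict String Int × PySem.Dict String (PySem.Set String)) e =>
      if PySem.Set.contains all_nodes e.1 && PySem.Set.contains all_nodes e.2 then
        (PySem.Dict.modify st.1 e.1 0 (fun v => v + 1),
         PySem.Dict.modify st.2 e.2 PySem.Set.empty (fun s => PySem.Set.add s e.1))
      else st)
    (PySem.Dict.empty, PySem.Dict.empty)
  -- `for n in all_nodes: if n not in in_degree: in_degree[n] = 0` (iteration order
  -- of the Python set only affects dict insertion order, never any getD value)
  let in_degree := all_nodes.foldl
    (fun (d : PySem.Dict String Int) n => if d.contains n then d else d.insert n 0) st.1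
  kahnLoopA st.2 (all_nodes.length + 1) in_degree all_nodes []

-- ===== PORT B =====
-- the while-frontier loop of B; same fuel bound as A's loop
def kahnLoopB (adj : PySem.Dict String (PySem.Set String)) :
    Nat → PySem.Dict String Int → PySem.Set String → List String → List (List String) →
    List (List String) × List String
  | 0, _, r, _, tiers => (tiers, PySem.List.sorted r (fun x => x) false)
  | fuel+1, d, r, frontier, tiers =>
    if frontier.isEmpty then (tiers, PySem.List.sorted r (fun x => x) false)
    else
      let st := frontier.foldl
        (fun (st : PySem.Dict String Int × PySem.Set String × List String) n =>
          let r' := PySem.Set.discard st.2.1 n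
          let p := (PySem.Dict.getD adj n PySem.Set.empty).foldl
            (fun (p : PySem.Dict String Int × List String) m =>
              let d' := PySem.Dict.modify p.1 m 0 (fun v => v - 1)
              (d', if d'.getD m 0 == 0 then p.2 ++ [m] else p.2))
            (st.1, st.2.2)
          (p.1, r', p.2)) (d, r, ([] : List String))
      kahnLoopB adj fuel st.1 st.2.1 (PySem.List.sorted st.2.2 (fun x => x) false)
        (tiers ++ [frontier])

def topological_sort_kahn_alt (nodes : List String) (dep_edges : List (String × String)) :
    List (List String) × List String :=
  let valid : PySem.Set String := PySem.Set.ofList nodes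
  let indeg0 := valid.foldl
    (fun (d : PySem.Dict String Int) n => d.insert n 0) PySem.Dict.empty
  let st := dep_edges.foldl
    (fun (st : PySem.Dict String (PySem.Set String) × PySem.Dict String Int) e =>
      if PySem.Set.contains valid e.1 && PySem.Set.contains valid e.2 then
        (PySem.Dict.modify st.1 e.2 PySem.Set.empty (fun s => PySem.Set.add s e.1),
         PySem.Dict.modify st.2 e.1 0 (fun v => v + 1))
      else st)
    (PySem.Dict.empty, indeg0)
  let frontier := PySem.List.sorted (valid.filter (fun n => st.2.getD n 0 == 0)) (fun x => x) false
  kahnLoopB st.1 (valid.length + 1) st.2 valid frontier []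

-- ===== PRECONDITION & SPEC =====
def Spec_topological_sort_kahn (nodes : List String) (dep_edges : List (String × String)) (out : List (List String) × List String) : Prop := out = topological_sort_kahn_alt nodes dep_edges
instance (nodes : List String) (dep_edges : List (String × String)) (out : List (List String) × List String) : Decidable (Spec_topological_sort_kahn nodes dep_edges out) := by unfold Spec_topological_sort_kahn; infer_instance

-- ===== CLAIM (what is proved, stated in full; the proofs are below) =====
def Claim_equal_topological_sort_kahn : Prop := ∀ (nodes : List String) (dep_edges : List (String × String)), Dom_topological_sort_kahn nodes dep_edges → Spec_topological_sort_kahn nodes dep_edges (topological_sort_kahn nodes dep_edges)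

-- ===== LEMMAS AND PROOFS =====

-- adjacency list of a node (the Python `adj.get(n, ...)`)
def adjL (adj : PySem.Dict String (PySem.Set String)) (n : String) : List String :=
  PySem.Dict.getD adj n PySem.Set.empty

-- number of nodes of r that still have m as a dependency
def pend (adj : PySem.Dict String (PySem.Set String)) (r : List String) (m : String) : Nat :=
  r.countP (fun n => decide (m ∈ adjL adj n))

-- pointwise equality of the two in-degree dicts
def dOK (d1 d2 : PySem.Dict String Int) : Prop :=
  ∀ k, PySem.Dict.getD d1 k 0 = PySem.Dict.getD d2 k 0

-- loop invariant of Kahn's algorithm: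
-- (Q) the stored in-degree dominates the number of still-remaining dependencies;
-- (W) a node mentioned in some adjacency list that has been placed already has
--     stored in-degree 0 and no remaining dependency slot.
def KahnInv (adj : PySem.Dict String (PySem.Set String)) (d : PySem.Dict String Int)
    (r : List String) : Prop :=
  (∀ m, (pend adj r m : Int) ≤ PySem.Dict.getD d m 0) ∧
  (∀ m, (∃ n, m ∈ adjL adj n) → m ∉ r → PySem.Dict.getD d m 0 = 0 ∧ pend adj r m = 0)

def AdjOK (adj : PySem.Dict String (PySem.Set String)) : Prop :=
  ∀ n, (adjL adj n).Nodup

-- A's inner decrement loop, as a getD formula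
theorem innerA_getD (L : List String) (hL : L.Nodup) (d : PySem.Dict String Int) (k : String) :
    PySem.Dict.getD (L.foldl (fun d m => PySem.Dict.modify d m 0 (fun v => v - 1)) d) k 0
      = PySem.Dict.getD d k 0 - (if k ∈ L then 1 else 0) := by
  induction L generalizing d with
  | nil => simp
  | cons a L ih =>
    rcases List.nodup_cons.mp hL with ⟨ha, hL'⟩
    simp only [List.foldl_cons]
    rw [ih hL']
    rw [PySem.Dict.getD_modify]
    by_cases hk : k = a
    · subst hk; simp [ha]
    · simp [List.mem_cons, hk]

-- B's inner loop: its dict component is A's inner loop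
theorem innerB_fst (L : List String) (d : PySem.Dict String Int) (nz : List String) :
    (L.foldl (fun (p : PySem.Dict String Int × List String) m =>
        (PySem.Dict.modify p.1 m 0 (fun v => v - 1),
         if (PySem.Dict.modify p.1 m 0 (fun v => v - 1)).getD m 0 == 0 then p.2 ++ [m] else p.2))
        (d, nz)).1
      = L.foldl (fun d m => PySem.Dict.modify d m 0 (fun v => v - 1)) d := by
  induction L generalizing d nz with
  | nil => rfl
  | cons a L ih => simp only [List.foldl_cons]; exact ih _ _

-- B's inner loop: the newly-zeroed list it appends
theorem innerB_snd (L : List String) (hL : L.Nodup) (d : PySem.Dict String Int) (nz : List String) :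
    (L.foldl (fun (p : PySem.Dict String Int × List String) m =>
        (PySem.Dict.modify p.1 m 0 (fun v => v - 1),
         if (PySem.Dict.modify p.1 m 0 (fun v => v - 1)).getD m 0 == 0 then p.2 ++ [m] else p.2))
        (d, nz)).2
      = nz ++ L.filter (fun m => PySem.Dict.getD d m 0 == 1) := by
  induction L generalizing d nz with
  | nil => simp
  | cons a L ih =>
    rcases List.nodup_cons.mp hL with ⟨ha, hL'⟩
    simp only [List.foldl_cons]
    rw [ih hL']
    have hfc : L.filter (fun m => PySem.Dict.getD (PySem.Dict.modify d a 0 (fun v => v - 1)) m 0 == 1)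
        = L.filter (fun m => PySem.Dict.getD d m 0 == 1) := by
      apply List.filter_congr
      intro x hx
      rw [PySem.Dict.getD_modify]
      have hxa : x ≠ a := fun h => ha (h ▸ hx)
      simp [hxa]
    have hcond : ((PySem.Dict.modify d a 0 (fun v => v - 1)).getD a 0 == 0)
        = (PySem.Dict.getD d a 0 == 1) := by
      rw [PySem.Dict.getD_modify]
      by_cases h1 : PySem.Dict.getD d a 0 = 1
      · simp [h1]
      · have t1 : (PySem.Dict.getD d a 0 - 1 == 0) = false := by
          simp [Int.sub_eq_zero]; omega
        have t2 : (PySem.Dict.getD d a 0 == 1) = false := by simp [h1]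
        simp [t1, t2]
    rw [hfc, hcond, List.filter_cons]
    by_cases h1 : (PySem.Dict.getD d a 0 == 1) = true
    · simp [h1]
    · simp only [Bool.not_eq_true] at h1
      simp [h1]

-- a node with stored in-degree 0 is in nobody's pending adjacency list
theorem frozen (adj : PySem.Dict String (PySem.Set String)) (d : PySem.Dict String Int)
    (r : List String) (hInv : KahnInv adj d r) (n m : String) (hn : n ∈ r)
    (hm : PySem.Dict.getD d m 0 = 0) : m ∉ adjL adj n := by
  intro hmem
  have hpos : 0 < pend adj r m := by
    unfold pend
    rw [List.countP_pos_iff]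
    exact ⟨n, hn, by simp [hmem]⟩
  by_cases hr : m ∈ r
  · have := hInv.1 m
    rw [hm] at this
    omega
  · have := (hInv.2 m ⟨n, hmem⟩ hr).2
    omega

-- countP after removing the (unique) element n
theorem countP_discard (r : List String) (hr : r.Nodup) (n : String) (hn : n ∈ r)
    (p : String → Bool) :
    ((PySem.Set.discard r n).countP p : Int) = (r.countP p : Int) - (if p n then 1 else 0) := by
  unfold PySem.Set.discard
  induction r with
  | nil => cases hn
  | cons a r ih =>
    rcases List.nodup_cons.mp hr with ⟨ha, hr'⟩
    rcases List.mem_cons.mp hn with h | h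
    · subst h
      have hcongr : (r.filter (fun y => !(y == n))) = r := by
        apply List.filter_eq_self.mpr
        intro x hx
        have hxn : x ≠ n := fun hxa => ha (by rw [hxa] at hx; exact hx)
        simp [hxn]
      rw [List.filter_cons]
      simp only [beq_self_eq_true, Bool.not_true, Bool.false_eq_true, if_false, hcongr,
        List.countP_cons]
      split_ifs with hp <;> push_cast <;> omega
    · have hne : a ≠ n := fun hx => ha (hx ▸ h)
      rw [List.filter_cons]
      have hb : (!(a == n)) = true := by simp [hne]
      simp only [hb, if_true, List.countP_cons]
      push_cast
      rw [ih hr' h]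
      split_ifs <;> omega

theorem countP_mono_except {α : Type} [BEq α] [LawfulBEq α] (l : List α) (p q : α → Bool) (b : α)
    (h : ∀ a, a ≠ b → q a = p a) : l.countP q ≤ l.countP p + l.count b := by
  induction l with
  | nil => simp
  | cons a l ih =>
    simp only [List.countP_cons, List.count_cons]
    by_cases hab : a = b
    · subst hab
      have : (a == a) = true := by simp
      simp only [this]
      split_ifs <;> omega
    · rw [h a hab]
      have : (a == b) = false := by simp [hab]
      simp only [this]
      split_ifs <;> omega

-- the loop bodies of the two per-tier folds, as named functions (definitionally
-- the lambdas occurring in kahnLoopA / kahnLoopB)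
def stepA (adj : PySem.Dict String (PySem.Set String))
    (st : PySem.Dict String Int × PySem.Set String) (n : String) :
    PySem.Dict String Int × PySem.Set String :=
  ((PySem.Dict.getD adj n PySem.Set.empty).foldl
      (fun d m => PySem.Dict.modify d m 0 (fun v => v - 1)) st.1,
   PySem.Set.discard st.2 n)

def stepB (adj : PySem.Dict String (PySem.Set String))
    (st : PySem.Dict String Int × PySem.Set String × List String) (n : String) :
    PySem.Dict String Int × PySem.Set String × List String :=
  (((PySem.Dict.getD adj n PySem.Set.empty).foldl
      (fun (p : PySem.Dict String Int × List String) m =>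
        (PySem.Dict.modify p.1 m 0 (fun v => v - 1),
         if (PySem.Dict.modify p.1 m 0 (fun v => v - 1)).getD m 0 == 0 then p.2 ++ [m] else p.2))
      (st.1, st.2.2)).1,
   PySem.Set.discard st.2.1 n,
   ((PySem.Dict.getD adj n PySem.Set.empty).foldl
      (fun (p : PySem.Dict String Int × List String) m =>
        (PySem.Dict.modify p.1 m 0 (fun v => v - 1),
         if (PySem.Dict.modify p.1 m 0 (fun v => v - 1)).getD m 0 == 0 then p.2 ++ [m] else p.2))
      (st.1, st.2.2)).2)

-- the per-tier fold: B's fold tracks A's fold and collects exactly the nodes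
-- whose in-degree has newly become zero
theorem tierFold (adj : PySem.Dict String (PySem.Set String)) (hadj : AdjOK adj)
    (g : String → Int) :
    ∀ (t : List String) (dA dB : PySem.Dict String Int) (r : PySem.Set String)
      (nz : List String),
      t.Nodup → (∀ x ∈ t, x ∈ r) → (∀ x ∈ t, PySem.Dict.getD dA x 0 = 0) →
      (∀ x ∈ t, g x = 0) →
      r.Nodup → KahnInv adj dA r → dOK dA dB →
      (∀ m, m ∈ nz ↔ (m ∈ r ∧ PySem.Dict.getD dA m 0 = 0 ∧ g m ≠ 0)) →
      (∀ m, g m = 0 → PySem.Dict.getD dA m 0 = 0) → nz.Nodup →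
      ((t.foldl (stepB adj) (dB, r, nz)).2.1 = (t.foldl (stepA adj) (dA, r)).2 ∧
       dOK (t.foldl (stepA adj) (dA, r)).1 (t.foldl (stepB adj) (dB, r, nz)).1 ∧
       (t.foldl (stepA adj) (dA, r)).2.Nodup ∧
       (∀ m, m ∈ (t.foldl (stepA adj) (dA, r)).2 ↔ m ∈ r ∧ m ∉ t) ∧
       KahnInv adj (t.foldl (stepA adj) (dA, r)).1 (t.foldl (stepA adj) (dA, r)).2 ∧
       (∀ m, m ∈ (t.foldl (stepB adj) (dB, r, nz)).2.2 ↔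
         (m ∈ (t.foldl (stepA adj) (dA, r)).2 ∧
          PySem.Dict.getD (t.foldl (stepA adj) (dA, r)).1 m 0 = 0 ∧ g m ≠ 0)) ∧
       (t.foldl (stepB adj) (dB, r, nz)).2.2.Nodup ∧
       (∀ m, g m = 0 → PySem.Dict.getD (t.foldl (stepA adj) (dA, r)).1 m 0 = 0)) := by
  intro t
  induction t with
  | nil =>
    intro dA dB r nz _ _ _ _ hrn hInv hdOK hnz hg0 hnzd
    refine ⟨rfl, hdOK, hrn, by simp, hInv, ?_, hnzd, hg0⟩
    intro m
    simpa using hnz m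
  | cons n t ih =>
    intro dA dB r nz ht hsub hz hgz hrn hInv hdOK hnz hg0 hnzd
    rcases List.nodup_cons.mp ht with ⟨hnotin, ht'⟩
    rcases hInv with ⟨hQ, hW⟩
    -- abbreviations for the one-step states
    set L := PySem.Dict.getD adj n PySem.Set.empty with hLdef
    have hLnd : L.Nodup := hadj n
    have hnr : n ∈ r := hsub n (List.mem_cons_self)
    have hdn : PySem.Dict.getD dA n 0 = 0 := hz n (List.mem_cons_self)
    have hfrozen0 : ∀ m, PySem.Dict.getD dA m 0 = 0 → m ∉ L :=
      fun m hm => frozen adj dA r ⟨hQ, hW⟩ n m hnr hm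
    have hnL : n ∉ L := hfrozen0 n hdn
    have hd1 : ∀ k, PySem.Dict.getD
        (L.foldl (fun d m => PySem.Dict.modify d m 0 (fun v => v - 1)) dA) k 0
        = PySem.Dict.getD dA k 0 - (if k ∈ L then 1 else 0) :=
      fun k => innerA_getD L hLnd dA k
    have hd1B : ∀ k, PySem.Dict.getD
        (L.foldl (fun d m => PySem.Dict.modify d m 0 (fun v => v - 1)) dB) k 0
        = PySem.Dict.getD dB k 0 - (if k ∈ L then 1 else 0) :=
      fun k => innerA_getD L hLnd dB k
    have hpend : ∀ m, (pend adj (PySem.Set.discard r n) m : Int)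
        = (pend adj r m : Int) - (if m ∈ L then 1 else 0) := by
      intro m
      have h := countP_discard r hrn n hnr (fun x => decide (m ∈ adjL adj x))
      unfold pend
      rw [h]
      congr 1
      rw [hLdef]
      simp [adjL, decide_eq_true_eq]
    -- the one-step states
    have hstepA : stepA adj (dA, r) n
        = (L.foldl (fun d m => PySem.Dict.modify d m 0 (fun v => v - 1)) dA,
           PySem.Set.discard r n) := rfl
    have hstepB : stepB adj (dB, r, nz) n
        = (L.foldl (fun d m => PySem.Dict.modify d m 0 (fun v => v - 1)) dB,
           PySem.Set.discard r n,
           nz ++ L.filter (fun m => PySem.Dict.getD dB m 0 == 1)) := by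
      unfold stepB
      dsimp only
      rw [innerB_fst, innerB_snd L hLnd]
    simp only [List.foldl_cons, hstepA, hstepB]
    -- invariants for the tail
    have hmemr1 : ∀ m, m ∈ PySem.Set.discard r n ↔ m ∈ r ∧ m ≠ n :=
      fun m => PySem.Set.mem_discard r n m
    have hQ1 : ∀ m, (pend adj (PySem.Set.discard r n) m : Int)
        ≤ PySem.Dict.getD
            (L.foldl (fun d m => PySem.Dict.modify d m 0 (fun v => v - 1)) dA) m 0 := by
      intro m
      rw [hd1, hpend]
      have := hQ m
      by_cases hmL : m ∈ L <;> simp [hmL] <;> omega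
    have hW1 : ∀ m, (∃ n', m ∈ adjL adj n') → m ∉ PySem.Set.discard r n →
        PySem.Dict.getD
          (L.foldl (fun d m => PySem.Dict.modify d m 0 (fun v => v - 1)) dA) m 0 = 0 ∧
        pend adj (PySem.Set.discard r n) m = 0 := by
      intro m hEx hmr1
      by_cases hmn : m = n
      · subst hmn
        have hp0 : pend adj r m = 0 := by have := hQ m; omega
        constructor
        · rw [hd1, if_neg hnL, hdn]; ring
        · have := hpend m
          rw [if_neg hnL] at this
          omega
      · have hmr : m ∉ r := by
          intro hmem
          exact hmr1 ((hmemr1 m).mpr ⟨hmem, hmn⟩)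
        rcases hW m hEx hmr with ⟨hdm, hpm⟩
        have hmL : m ∉ L := hfrozen0 m hdm
        constructor
        · rw [hd1, if_neg hmL, hdm]; ring
        · have := hpend m
          rw [if_neg hmL] at this
          omega
    have hnz1 : ∀ m, m ∈ nz ++ L.filter (fun m => PySem.Dict.getD dB m 0 == 1) ↔
        (m ∈ PySem.Set.discard r n ∧
         PySem.Dict.getD
           (L.foldl (fun d m => PySem.Dict.modify d m 0 (fun v => v - 1)) dA) m 0 = 0 ∧
         g m ≠ 0) := by
      intro m
      rw [List.mem_append, List.mem_filter]
      have hdBA : PySem.Dict.getD dB m 0 = PySem.Dict.getD dA m 0 := (hdOK m).symm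
      constructor
      · rintro (hmnz | ⟨hmL, hbeq⟩)
        · rcases (hnz m).mp hmnz with ⟨hmr, hdm, hgm⟩
          have hmL : m ∉ L := hfrozen0 m hdm
          refine ⟨(hmemr1 m).mpr ⟨hmr, ?_⟩, ?_, hgm⟩
          · intro hmn; subst hmn
            exact hgm (hgz m (List.mem_cons_self))
          · rw [hd1, if_neg hmL, hdm]; ring
        · have hdm1 : PySem.Dict.getD dA m 0 = 1 := by
            rw [← hdBA]; exact eq_of_beq hbeq
          have hgm : g m ≠ 0 := by
            intro hgm0
            have := hg0 m hgm0
            omega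
          have hmr : m ∈ r := by
            by_contra hmr
            rcases hW m ⟨n, by unfold adjL; rw [← hLdef]; exact hmL⟩ hmr with ⟨hdm, _⟩
            omega
          have hmn : m ≠ n := by
            intro hmn; subst hmn; omega
          refine ⟨(hmemr1 m).mpr ⟨hmr, hmn⟩, ?_, hgm⟩
          rw [hd1, if_pos hmL, hdm1]; ring
      · rintro ⟨hmr1, hd1m, hgm⟩
        rcases (hmemr1 m).mp hmr1 with ⟨hmr, hmn⟩
        by_cases hmL : m ∈ L
        · right
          rw [hd1, if_pos hmL] at hd1m
          refine ⟨hmL, ?_⟩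
          rw [hdBA]
          have : PySem.Dict.getD dA m 0 = 1 := by omega
          simp [this]
        · left
          rw [hd1, if_neg hmL] at hd1m
          refine (hnz m).mpr ⟨hmr, by omega, hgm⟩
    have hg01 : ∀ m, g m = 0 → PySem.Dict.getD
        (L.foldl (fun d m => PySem.Dict.modify d m 0 (fun v => v - 1)) dA) m 0 = 0 := by
      intro m hgm
      have hdm := hg0 m hgm
      rw [hd1, if_neg (hfrozen0 m hdm), hdm]; ring
    have hnzd1 : (nz ++ L.filter (fun m => PySem.Dict.getD dB m 0 == 1)).Nodup := by
      rw [List.nodup_append]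
      refine ⟨hnzd, hLnd.filter (fun m => PySem.Dict.getD dB m 0 == 1), ?_⟩
      intro x hxnz y hyf hxy
      rcases (hnz x).mp hxnz with ⟨_, hdx, _⟩
      rcases List.mem_filter.mp hyf with ⟨_, hbeq⟩
      have h1 : PySem.Dict.getD dB y 0 = 1 := eq_of_beq hbeq
      have h2 := hdOK x
      rw [hxy] at h2 hdx
      omega
    have hres := ih
      (L.foldl (fun d m => PySem.Dict.modify d m 0 (fun v => v - 1)) dA)
      (L.foldl (fun d m => PySem.Dict.modify d m 0 (fun v => v - 1)) dB)
      (PySem.Set.discard r n)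
      (nz ++ L.filter (fun m => PySem.Dict.getD dB m 0 == 1))
      ht'
      (fun x hx => (hmemr1 x).mpr ⟨hsub x (List.mem_cons_of_mem n hx),
        fun hxn => hnotin (hxn ▸ hx)⟩)
      (fun x hx => by
        have hdx := hz x (List.mem_cons_of_mem n hx)
        rw [hd1, if_neg (hfrozen0 x hdx), hdx]; ring)
      (fun x hx => hgz x (List.mem_cons_of_mem n hx))
      (PySem.Set.nodup_discard r n hrn)
      ⟨hQ1, hW1⟩
      (fun k => by rw [hd1, hd1B, hdOK k])
      hnz1 hg01 hnzd1
    refine ⟨hres.1, hres.2.1, hres.2.2.1, ?_, hres.2.2.2.2.1, hres.2.2.2.2.2.1,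
      hres.2.2.2.2.2.2.1, hres.2.2.2.2.2.2.2⟩
    intro m
    rw [hres.2.2.2.1 m, hmemr1 m]
    simp only [List.mem_cons]
    constructor
    · rintro ⟨⟨hmr, hmn⟩, hmt⟩
      exact ⟨hmr, fun h => h.elim hmn hmt⟩
    · rintro ⟨hmr, hmt⟩
      exact ⟨⟨hmr, fun h => hmt (Or.inl h)⟩, fun h => hmt (Or.inr h)⟩

-- the two loops agree, given the invariant and a frontier equal to A's next tier
theorem simLoop (adj : PySem.Dict String (PySem.Set String)) (hadj : AdjOK adj) :
    ∀ (fuel : Nat) (dA dB : PySem.Dict String Int) (r : PySem.Set String)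
      (tiers : List (List String)),
      r.Nodup → KahnInv adj dA r → dOK dA dB →
      kahnLoopB adj fuel dB r
        (PySem.List.sorted (r.filter (fun n => PySem.Dict.getD dA n 0 == 0)) (fun x => x) false)
        tiers
      = kahnLoopA adj fuel dA r tiers := by
  intro fuel
  induction fuel with
  | zero => intro dA dB r tiers _ _ _; rfl
  | succ fuel ih =>
    intro dA dB r tiers hrn hInv hdOK
    simp only [kahnLoopA, kahnLoopB]
    by_cases he : (PySem.List.sorted (r.filter (fun n => PySem.Dict.getD dA n 0 == 0))
        (fun x => x) false).isEmpty = true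
    · simp only [he, if_true]
    · simp only [he, Bool.false_eq_true, if_false]
      have eA : (fun (st : PySem.Dict String Int × PySem.Set String) n =>
          ((PySem.Dict.getD adj n PySem.Set.empty).foldl
              (fun d m => PySem.Dict.modify d m 0 (fun v => v - 1)) st.1,
           PySem.Set.discard st.2 n)) = stepA adj := rfl
      have eB : (fun (st : PySem.Dict String Int × PySem.Set String × List String) n =>
          let r' := PySem.Set.discard st.2.1 n
          let p := (PySem.Dict.getD adj n PySem.Set.empty).foldl
            (fun (p : PySem.Dict String Int × List String) m =>
              let d' := PySem.Dict.modify p.1 m 0 (fun v => v - 1)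
              (d', if d'.getD m 0 == 0 then p.2 ++ [m] else p.2))
            (st.1, st.2.2)
          (p.1, r', p.2)) = stepB adj := rfl
      rw [eA, eB]
      set T := PySem.List.sorted (r.filter (fun n => PySem.Dict.getD dA n 0 == 0))
        (fun x => x) false with hTdef
      have hTnd : T.Nodup :=
        ((PySem.List.sorted_perm _ _ _).nodup_iff).mpr (hrn.filter _)
      have hTmem : ∀ x, x ∈ T ↔ x ∈ r ∧ PySem.Dict.getD dA x 0 = 0 := by
        intro x
        rw [hTdef, PySem.List.mem_sorted, List.mem_filter]
        simp
      have hres := tierFold adj hadj (fun m => PySem.Dict.getD dA m 0) T dA dB r []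
        hTnd
        (fun x hx => ((hTmem x).mp hx).1)
        (fun x hx => ((hTmem x).mp hx).2)
        (fun x hx => ((hTmem x).mp hx).2)
        hrn hInv hdOK
        (by
          intro m
          constructor
          · intro h; cases h
          · rintro ⟨_, h, h'⟩; exact absurd h h')
        (fun m h => h)
        List.nodup_nil
      obtain ⟨hSBr, hdOK', hnd', hmem', hInv', hnzc, hnznd, _⟩ := hres
      rw [hSBr]
      have hfr : PySem.List.sorted (T.foldl (stepB adj) (dB, r, [])).2.2 (fun x => x) false
          = PySem.List.sorted ((T.foldl (stepA adj) (dA, r)).2.filter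
              (fun n => PySem.Dict.getD (T.foldl (stepA adj) (dA, r)).1 n 0 == 0))
              (fun x => x) false := by
        apply PySem.List.sorted_eq_sorted_of_perm _ _ _ Function.injective_id
        rw [List.perm_ext_iff_of_nodup hnznd (hnd'.filter _)]
        intro m
        rw [List.mem_filter, hnzc m]
        constructor
        · rintro ⟨hm1, hm2, _⟩
          exact ⟨hm1, by simp [hm2]⟩
        · rintro ⟨hm1, hm2⟩
          have hm2' : PySem.Dict.getD (T.foldl (stepA adj) (dA, r)).1 m 0 = 0 :=
            eq_of_beq hm2
          refine ⟨hm1, hm2', ?_⟩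
          intro hdm0
          have hmT : m ∈ T := (hTmem m).mpr ⟨((hmem' m).mp hm1).1, hdm0⟩
          exact ((hmem' m).mp hm1).2 hmT
      rw [hfr]
      exact ih (T.foldl (stepA adj) (dA, r)).1 (T.foldl (stepB adj) (dB, r, [])).1
        (T.foldl (stepA adj) (dA, r)).2 (tiers ++ [T]) hnd' hInv' hdOK'

-- ===== initial-state lemmas =====

-- the zero-fill loop of A does not change any getD value
theorem fill_getD (ns : List String) (d : PySem.Dict String Int) (k : String) :
    PySem.Dict.getD
      (ns.foldl (fun (d : PySem.Dict String Int) n => if d.contains n then d else d.insert n 0) d)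
      k 0 = PySem.Dict.getD d k 0 := by
  induction ns generalizing d with
  | nil => rfl
  | cons a ns ih =>
    simp only [List.foldl_cons]
    by_cases hc : d.contains a = true
    · simp [hc, ih]
    · simp only [Bool.not_eq_true] at hc
      simp only [hc, Bool.false_eq_true, if_false]
      rw [ih, PySem.Dict.getD_insert]
      split_ifs with hk
      · subst hk; exact (PySem.Dict.getD_of_not_contains d 0 hc).symm
      · rfl

-- dict.fromkeys(valid, 0) reads as 0 everywhere
theorem fromkeys_getD (ns : List String) (k : String) :
    PySem.Dict.getD
      (ns.foldl (fun (d : PySem.Dict String Int) n => d.insert n 0) PySem.Dict.empty) k 0 = 0 := by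
  have gen : ∀ (ns : List String) (d : PySem.Dict String Int),
      (∀ k, PySem.Dict.getD d k 0 = 0) →
      ∀ k, PySem.Dict.getD (ns.foldl (fun (d : PySem.Dict String Int) n => d.insert n 0) d) k 0 = 0 := by
    intro ns
    induction ns with
    | nil => intro d h k; exact h k
    | cons a ns ih =>
      intro d h k
      simp only [List.foldl_cons]
      apply ih
      intro k'
      rw [PySem.Dict.getD_insert]
      split_ifs <;> simp [h]
  exact gen ns PySem.Dict.empty (fun k => by simp [PySem.Dict.getD_empty]) k

-- A's edge fold, split into its two independent components
theorem buildA_split (all : PySem.Set String) (es : List (String × String))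
    (p : PySem.Dict String Int × PySem.Dict String (PySem.Set String)) :
    es.foldl
      (fun (st : PySem.Dict String Int × PySem.Dict String (PySem.Set String)) e =>
        if PySem.Set.contains all e.1 && PySem.Set.contains all e.2 then
          (PySem.Dict.modify st.1 e.1 0 (fun v => v + 1),
           PySem.Dict.modify st.2 e.2 PySem.Set.empty (fun s => PySem.Set.add s e.1))
        else st) p
    = (es.foldl
        (fun (d : PySem.Dict String Int) e =>
          if PySem.Set.contains all e.1 && PySem.Set.contains all e.2 then
            PySem.Dict.modify d e.1 0 (fun v => v + 1) else d) p.1,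
       es.foldl
        (fun (a : PySem.Dict String (PySem.Set String)) e =>
          if PySem.Set.contains all e.1 && PySem.Set.contains all e.2 then
            PySem.Dict.modify a e.2 PySem.Set.empty (fun s => PySem.Set.add s e.1) else a) p.2) := by
  induction es generalizing p with
  | nil => rfl
  | cons e es ih =>
    simp only [List.foldl_cons]
    by_cases hg : (PySem.Set.contains all e.1 && PySem.Set.contains all e.2) = true
    · simp only [hg, if_true]; exact ih _
    · simp only [hg, Bool.false_eq_true, if_false]
      exact ih p

-- B's edge fold, split the same way
theorem buildB_split (all : PySem.Set String) (es : List (String × String))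
    (p : PySem.Dict String (PySem.Set String) × PySem.Dict String Int) :
    es.foldl
      (fun (st : PySem.Dict String (PySem.Set String) × PySem.Dict String Int) e =>
        if PySem.Set.contains all e.1 && PySem.Set.contains all e.2 then
          (PySem.Dict.modify st.1 e.2 PySem.Set.empty (fun s => PySem.Set.add s e.1),
           PySem.Dict.modify st.2 e.1 0 (fun v => v + 1))
        else st) p
    = (es.foldl
        (fun (a : PySem.Dict String (PySem.Set String)) e =>
          if PySem.Set.contains all e.1 && PySem.Set.contains all e.2 then
            PySem.Dict.modify a e.2 PySem.Set.empty (fun s => PySem.Set.add s e.1) else a) p.1,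
       es.foldl
        (fun (d : PySem.Dict String Int) e =>
          if PySem.Set.contains all e.1 && PySem.Set.contains all e.2 then
            PySem.Dict.modify d e.1 0 (fun v => v + 1) else d) p.2) := by
  induction es generalizing p with
  | nil => rfl
  | cons e es ih =>
    simp only [List.foldl_cons]
    by_cases hg : (PySem.Set.contains all e.1 && PySem.Set.contains all e.2) = true
    · simp only [hg, if_true]; exact ih _
    · simp only [hg, Bool.false_eq_true, if_false]
      exact ih p

-- pointwise equality is preserved by the shared increment fold
theorem degFold_dOK (all : PySem.Set String) (es : List (String × String))
    (d1 d2 : PySem.Dict String Int) (h : dOK d1 d2) :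
    dOK (es.foldl
          (fun (d : PySem.Dict String Int) e =>
            if PySem.Set.contains all e.1 && PySem.Set.contains all e.2 then
              PySem.Dict.modify d e.1 0 (fun v => v + 1) else d) d1)
        (es.foldl
          (fun (d : PySem.Dict String Int) e =>
            if PySem.Set.contains all e.1 && PySem.Set.contains all e.2 then
              PySem.Dict.modify d e.1 0 (fun v => v + 1) else d) d2) := by
  induction es generalizing d1 d2 with
  | nil => exact h
  | cons e es ih =>
    simp only [List.foldl_cons]
    apply ih
    split_ifs with hg
    · intro k
      rw [PySem.Dict.getD_modify, PySem.Dict.getD_modify]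
      rw [h e.1, h k]
    · exact h

-- properties of the built adjacency and in-degree: nodup values, range inside
-- `all`, and the in-degree dominates the pending count (invariant (Q) at start)
theorem build_props (all : PySem.Set String) (hall : all.Nodup) (es : List (String × String)) :
    ∀ (a : PySem.Dict String (PySem.Set String)) (d : PySem.Dict String Int),
      AdjOK a → (∀ n m, m ∈ adjL a n → m ∈ all) →
      (∀ m, (pend a all m : Int) ≤ PySem.Dict.getD d m 0) →
      (AdjOK (es.foldl
          (fun (a : PySem.Dict String (PySem.Set String)) e =>
            if PySem.Set.contains all e.1 && PySem.Set.contains all e.2 then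
              PySem.Dict.modify a e.2 PySem.Set.empty (fun s => PySem.Set.add s e.1) else a) a) ∧
       (∀ n m, m ∈ adjL (es.foldl
          (fun (a : PySem.Dict String (PySem.Set String)) e =>
            if PySem.Set.contains all e.1 && PySem.Set.contains all e.2 then
              PySem.Dict.modify a e.2 PySem.Set.empty (fun s => PySem.Set.add s e.1) else a) a) n
          → m ∈ all) ∧
       (∀ m, (pend (es.foldl
          (fun (a : PySem.Dict String (PySem.Set String)) e =>
            if PySem.Set.contains all e.1 && PySem.Set.contains all e.2 then
              PySem.Dict.modify a e.2 PySem.Set.empty (fun s => PySem.Set.add s e.1) else a) a)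
            all m : Int)
          ≤ PySem.Dict.getD (es.foldl
              (fun (d : PySem.Dict String Int) e =>
                if PySem.Set.contains all e.1 && PySem.Set.contains all e.2 then
                  PySem.Dict.modify d e.1 0 (fun v => v + 1) else d) d) m 0)) := by
  intro a d hA hR hQ
  induction es generalizing a d with
  | nil => exact ⟨hA, hR, hQ⟩
  | cons e es ih =>
    simp only [List.foldl_cons]
    by_cases hg : (PySem.Set.contains all e.1 && PySem.Set.contains all e.2) = true
    · simp only [hg, if_true]
      have he1 : e.1 ∈ all := (PySem.Set.contains_iff all e.1).mp ((Bool.and_eq_true _ _).mp hg).1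
      have hadjL : ∀ n, adjL (PySem.Dict.modify a e.2 PySem.Set.empty (fun s => PySem.Set.add s e.1)) n
          = if n = e.2 then PySem.Set.add (adjL a e.2) e.1 else adjL a n := by
        intro n; unfold adjL; rw [PySem.Dict.getD_modify]
      apply ih
      · intro n; rw [hadjL]; split_ifs with h
        · exact PySem.Set.nodup_add _ _ (hA e.2)
        · exact hA n
      · intro n m hm; rw [hadjL] at hm; split_ifs at hm with h
        · rcases (PySem.Set.mem_add _ _ _).mp hm with h' | h'
          · exact hR e.2 m h'
          · exact h' ▸ he1
        · exact hR n m hm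
      · intro m
        rw [PySem.Dict.getD_modify]
        by_cases hme : m = e.1
        · subst hme
          rw [if_pos rfl]
          have hcnt : pend (PySem.Dict.modify a e.2 PySem.Set.empty (fun s => PySem.Set.add s e.1)) all e.1
              ≤ pend a all e.1 + 1 := by
            have hmono := countP_mono_except all
              (fun n => decide (e.1 ∈ adjL a n))
              (fun n => decide (e.1 ∈ adjL (PySem.Dict.modify a e.2 PySem.Set.empty (fun s => PySem.Set.add s e.1)) n))
              e.2 (by
                intro n hn
                show decide (e.1 ∈ adjL (PySem.Dict.modify a e.2 PySem.Set.empty (fun s => PySem.Set.add s e.1)) n)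
                  = decide (e.1 ∈ adjL a n)
                rw [hadjL, if_neg hn])
            have hc1 : all.count e.2 ≤ 1 := List.nodup_iff_count_le_one.mp hall e.2
            unfold pend
            omega
          have := hQ e.1
          omega
        · rw [if_neg hme]
          have hpeq : pend (PySem.Dict.modify a e.2 PySem.Set.empty (fun s => PySem.Set.add s e.1)) all m
              = pend a all m := by
            unfold pend
            apply List.countP_congr
            intro n _
            rw [hadjL]
            split_ifs with h
            · subst h
              simp [PySem.Set.mem_add, hme]
            · rfl
          rw [hpeq]
          exact hQ m
    · simp only [Bool.not_eq_true] at hg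
      simp only [hg, Bool.false_eq_true, if_false]
      exact ih a d hA hR hQ

-- ===== VERDICT (by name: the statement is the Claim_ definition above) =====
theorem topological_sort_kahn_spec : Claim_equal_topological_sort_kahn := by
  intro nodes dep_edges _
  unfold Spec_topological_sort_kahn topological_sort_kahn topological_sort_kahn_alt
  dsimp only
  rw [buildA_split, buildB_split]
  dsimp only
  -- names for the common pieces
  set all := PySem.Set.ofList nodes with hall
  set adjF := dep_edges.foldl
    (fun (a : PySem.Dict String (PySem.Set String)) e =>
      if PySem.Set.contains all e.1 && PySem.Set.contains all e.2 then
        PySem.Dict.modify a e.2 PySem.Set.empty (fun s => PySem.Set.add s e.1) else a)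
    PySem.Dict.empty with hadjF
  set dA := all.foldl
    (fun (d : PySem.Dict String Int) n => if d.contains n then d else d.insert n 0)
    (dep_edges.foldl
      (fun (d : PySem.Dict String Int) e =>
        if PySem.Set.contains all e.1 && PySem.Set.contains all e.2 then
          PySem.Dict.modify d e.1 0 (fun v => v + 1) else d)
      PySem.Dict.empty) with hdA
  set dB := dep_edges.foldl
    (fun (d : PySem.Dict String Int) e =>
      if PySem.Set.contains all e.1 && PySem.Set.contains all e.2 then
        PySem.Dict.modify d e.1 0 (fun v => v + 1) else d)
    (all.foldl (fun (d : PySem.Dict String Int) n => d.insert n 0) PySem.Dict.empty) with hdB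
  have hrn : List.Nodup all := PySem.Set.nodup_ofList nodes
  -- pointwise equality of the two in-degree dicts
  have hbase : dOK PySem.Dict.empty
      (all.foldl (fun (d : PySem.Dict String Int) n => d.insert n 0) PySem.Dict.empty) := by
    intro k
    rw [PySem.Dict.getD_empty, fromkeys_getD]
  have hdOK : dOK dA dB := by
    intro k
    rw [hdA, fill_getD, hdB]
    exact degFold_dOK all dep_edges _ _ hbase k
  -- initial invariant
  have hA0 : AdjOK (PySem.Dict.empty : PySem.Dict String (PySem.Set String)) := by
    intro n
    unfold adjL
    rw [PySem.Dict.getD_empty]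
    exact List.nodup_nil
  have hR0 : ∀ n m, m ∈ adjL (PySem.Dict.empty : PySem.Dict String (PySem.Set String)) n →
      m ∈ all := by
    intro n m hm
    unfold adjL at hm
    rw [PySem.Dict.getD_empty] at hm
    cases hm
  have hQ0 : ∀ m, (pend (PySem.Dict.empty : PySem.Dict String (PySem.Set String)) all m : Int)
      ≤ PySem.Dict.getD (PySem.Dict.empty : PySem.Dict String Int) m 0 := by
    intro m
    have hp : pend (PySem.Dict.empty : PySem.Dict String (PySem.Set String)) all m = 0 := by
      unfold pend adjL
      simp [PySem.Dict.getD_empty]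
    rw [hp, PySem.Dict.getD_empty]; exact le_refl 0
  have hbp := build_props all hrn dep_edges PySem.Dict.empty PySem.Dict.empty hA0 hR0 hQ0
  obtain ⟨hAdj, hRange, hQ⟩ := hbp
  have hInv : KahnInv adjF dA all := by
    constructor
    · intro m
      rw [hdA, fill_getD]
      exact hQ m
    · rintro m ⟨n, hm⟩ hnr
      exact absurd (hRange n m hm) hnr
  -- B's initial frontier, expressed through dA
  have hfil : all.filter (fun n => PySem.Dict.getD dB n 0 == 0)
      = all.filter (fun n => PySem.Dict.getD dA n 0 == 0) := by
    apply List.filter_congr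
    intro x _
    rw [hdOK x]
  rw [hfil]
  exact (simLoop adjF hAdj (all.length + 1) dA dB all [] hrn hInv hdOK).symm
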